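-- pv_equiv track=rewrite | github.com/bennettoxford/openprescribing-hospitals | viewer/views/api.py | all_products_have_same_single_ingredient
-- ===== SOURCE A (Python) =====
-- def all_products_have_same_single_ingredient(products):
--     """Check if all products have exactly the same single ingredient."""
--     if not products:
--         return False
--
--     # Check if all products have exactly one ingredient
--     for product in products:
--         ingredient_names = product.get('ingredient_names', [])
--         if not ingredient_names or len(ingredient_names) != 1:
--             return False
--
--     # Check if all products have the same ingredient
--     first_ingredient = products[0]['ingredient_names'][0]
--     return all(
--         product['ingredient_names'][0] == first_ingredient
--         for product in products
--     )
-- ===== SOURCE B (Python) =====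
-- def all_products_have_same_single_ingredient(products):
--     """Check if all products have exactly the same single ingredient."""
--     ingredients = set()
--     for product in products:
--         names = product.get('ingredient_names', [])
--         if not names or len(names) != 1:
--             return False
--         ingredients.add(names[0])
--     return len(ingredients) == 1
-- ===== Notes on version B (the rewrite author's own statement) =====
-- stated objective: alternative
-- what changed: Replaces A's two passes (a validation loop plus a compare-every-head-to-the-first pass) by a single pass that collects each product's single ingredient into a set and finally tests that the set has exactly one element.
import Mathlib
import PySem

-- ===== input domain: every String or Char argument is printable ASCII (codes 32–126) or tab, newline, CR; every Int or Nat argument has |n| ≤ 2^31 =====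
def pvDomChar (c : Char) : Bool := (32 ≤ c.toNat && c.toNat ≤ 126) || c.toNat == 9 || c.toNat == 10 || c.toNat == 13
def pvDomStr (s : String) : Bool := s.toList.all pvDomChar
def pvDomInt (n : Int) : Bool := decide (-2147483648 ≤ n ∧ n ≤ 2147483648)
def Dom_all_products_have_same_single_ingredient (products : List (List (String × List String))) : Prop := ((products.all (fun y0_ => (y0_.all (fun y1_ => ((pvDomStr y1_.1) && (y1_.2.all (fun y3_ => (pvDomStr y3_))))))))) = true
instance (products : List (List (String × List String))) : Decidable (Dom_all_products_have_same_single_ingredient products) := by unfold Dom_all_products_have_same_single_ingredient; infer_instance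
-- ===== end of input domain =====

-- B replaces A's two passes (validate each length, then compare every head to the first)
-- by a single pass collecting the single ingredients into a set whose final size must be 1.

-- ===== PORT A =====
-- first for-loop of A: every product has exactly one ingredient name, else return False
def aCheckSingle : List (List (String × List String)) → Bool
  | [] => true
  | product :: rest =>
    let ingredient_names := (PySem.Dict.mk product).getD "ingredient_names" []
    if ingredient_names = [] ∨ ingredient_names.length ≠ 1 then false
    else aCheckSingle rest

def all_products_have_same_single_ingredient (products : List (List (String × List String))) : Bool :=
  if products = [] then false
  else if aCheckSingle products then
    -- the `none` branches are totality guards: Python's [0]/['ingredient_names'] cannot fail here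
    match PySem.List.pyGet? products 0 with
    | none => false
    | some first =>
      match (PySem.Dict.mk first).get? "ingredient_names" with
      | none => false
      | some ns =>
        match PySem.List.pyGet? ns 0 with
        | none => false
        | some first_ingredient =>
          products.all (fun product =>
            match (PySem.Dict.mk product).get? "ingredient_names" with
            | none => false
            | some ns' =>
              match PySem.List.pyGet? ns' 0 with
              | none => false
              | some x => x == first_ingredient)
  else false

-- ===== PORT B =====
def bGo : List (List (String × List String)) → PySem.Set String → Bool
  | [], ingredients => PySem.Set.len ingredients == 1
  | product :: rest, ingredients =>
    let names := (PySem.Dict.mk product).getD "ingredient_names" []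
    if names = [] ∨ names.length ≠ 1 then false
    else
      match PySem.List.pyGet? names 0 with
      | none => false  -- totality guard: names has length 1 here
      | some x => bGo rest (PySem.Set.add ingredients x)

def all_products_have_same_single_ingredient_alt (products : List (List (String × List String))) : Bool :=
  bGo products PySem.Set.empty

-- ===== PRECONDITION & SPEC =====
def Spec_all_products_have_same_single_ingredient (products : List (List (String × List String))) (out : Bool) : Prop := out = all_products_have_same_single_ingredient_alt products
instance (products : List (List (String × List String))) (out : Bool) : Decidable (Spec_all_products_have_same_single_ingredient products out) := by unfold Spec_all_products_have_same_single_ingredient; infer_instance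

-- ===== CLAIM (what is proved, stated in full; the proofs are below) =====
def Claim_equal_all_products_have_same_single_ingredient : Prop := ∀ (products : List (List (String × List String))), Dom_all_products_have_same_single_ingredient products → Spec_all_products_have_same_single_ingredient products (all_products_have_same_single_ingredient products)

-- ===== LEMMAS AND PROOFS =====

-- the ingredient_names list of a product (with Python's .get default [])
def pnames (p : List (String × List String)) : List String :=
  (PySem.Dict.mk p).getD "ingredient_names" []

lemma guard_iff (p : List (String × List String)) :
    (pnames p = [] ∨ (pnames p).length ≠ 1) ↔ (pnames p).length ≠ 1 := by
  constructor
  · rintro (h | h)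
    · rw [h]; simp
    · exact h
  · exact Or.inr

lemma aCheckSingle_iff (l : List (List (String × List String))) :
    aCheckSingle l = true ↔ ∀ p ∈ l, (pnames p).length = 1 := by
  induction l with
  | nil => simp [aCheckSingle]
  | cons p rest ih =>
    show (if pnames p = [] ∨ (pnames p).length ≠ 1 then false else aCheckSingle rest) = true ↔ _
    by_cases h : (pnames p).length = 1
    · rw [if_neg (by rw [guard_iff]; exact fun hc => hc h), ih]
      constructor
      · intro hall q hq
        rcases List.mem_cons.mp hq with rfl | hq
        · exact h
        · exact hall q hq
      · intro hall q hq; exact hall q (List.mem_cons_of_mem _ hq)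
    · rw [if_pos (guard_iff p |>.mpr h)]
      simp only [Bool.false_eq_true, false_iff]
      intro hall; exact h (hall p (List.mem_cons_self ..))

lemma names_len_one (p : List (String × List String)) (h : (pnames p).length = 1) :
    ∃ x, (PySem.Dict.mk p).get? "ingredient_names" = some [x] ∧ pnames p = [x] := by
  rcases List.length_eq_one_iff.mp h with ⟨x, hx⟩
  refine ⟨x, ?_, hx⟩
  rw [pnames, PySem.Dict.getD_eq_get?_getD] at hx
  cases hget : (PySem.Dict.mk p).get? "ingredient_names" with
  | none => rw [hget] at hx; simp at hx
  | some v => rw [hget] at hx; simp at hx; rw [hx]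

lemma foldl_add_const (x : String) :
    ∀ (l : List String), (∀ y ∈ l, y = x) → l.foldl PySem.Set.add [x] = [x] := by
  intro l
  induction l with
  | nil => intro _; rfl
  | cons y t ih =>
    intro h
    have hy : y = x := h y (List.mem_cons_self ..)
    subst hy
    simp only [List.foldl_cons]
    rw [show PySem.Set.add [y] y = [y] by simp [PySem.Set.add, PySem.Set.contains]]
    exact ih (fun z hz => h z (List.mem_cons_of_mem _ hz))

lemma ofList_len_one (x : String) (l : List String) :
    (PySem.Set.ofList (x :: l) : List String).length = 1 ↔ ∀ y ∈ l, y = x := by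
  constructor
  · intro h
    rcases List.length_eq_one_iff.mp h with ⟨z, hz⟩
    intro y hy
    have hx : x ∈ PySem.Set.ofList (x :: l) := by
      rw [PySem.Set.mem_ofList]; exact List.mem_cons_self ..
    have hyy : y ∈ PySem.Set.ofList (x :: l) := by
      rw [PySem.Set.mem_ofList]; exact List.mem_cons_of_mem _ hy
    rw [hz] at hx hyy
    simp at hx hyy
    rw [hx, hyy]
  · intro h
    rw [show PySem.Set.ofList (x :: l) = [x] by
      rw [PySem.Set.ofList_eq_foldl]
      simp only [List.foldl_cons]
      rw [show PySem.Set.add ([] : PySem.Set String) x = [x] from rfl]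
      exact foldl_add_const x l h]
    rfl

lemma pyGet?_len_one {x : String} {ns : List String} (h : ns = [x]) :
    PySem.List.pyGet? ns 0 = some x := by rw [h]; rfl

lemma bGo_eq (l : List (List (String × List String))) (s : PySem.Set String) :
    bGo l s = if ∀ p ∈ l, (pnames p).length = 1 then
        decide ((PySem.Set.update s (l.map (fun p => (pnames p).headI)) : List String).length = 1)
      else false := by
  induction l generalizing s with
  | nil =>
    rw [if_pos (by simp)]
    show (PySem.Set.len s == 1) = _
    rw [Bool.eq_iff_iff, beq_iff_eq, decide_eq_true_iff, PySem.Set.len, PySem.Set.update]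
    simp
  | cons p rest ih =>
    show (if pnames p = [] ∨ (pnames p).length ≠ 1 then false
          else match PySem.List.pyGet? (pnames p) 0 with
               | none => false
               | some x => bGo rest (PySem.Set.add s x)) = _
    by_cases h : (pnames p).length = 1
    · rw [if_neg (by rw [guard_iff]; exact fun hc => hc h)]
      rcases names_len_one p h with ⟨x, _, hpx⟩
      rw [pyGet?_len_one hpx]
      show bGo rest (PySem.Set.add s x) = _
      rw [ih]
      have hhead : (pnames p).headI = x := by rw [hpx]; rfl
      by_cases hr : ∀ q ∈ rest, (pnames q).length = 1
      · rw [if_pos hr, if_pos (by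
          intro q hq
          rcases List.mem_cons.mp hq with h1 | hq
          · rw [h1]; exact h
          · exact hr q hq)]
        congr 1
        simp only [List.map_cons, hhead, PySem.Set.update, List.foldl_cons]
      · rw [if_neg hr, if_neg (fun hall =>
          hr (fun q hq => hall q (List.mem_cons_of_mem _ hq)))]
    · rw [if_pos (guard_iff p |>.mpr h),
          if_neg (fun hall => h (hall p (List.mem_cons_self ..)))]

lemma B_iff (first : List (String × List String)) (rest : List (List (String × List String))) :
    all_products_have_same_single_ingredient_alt (first :: rest) = true ↔
      ∀ p ∈ first :: rest, pnames p = [(pnames first).headI] := by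
  rw [all_products_have_same_single_ingredient_alt, bGo_eq]
  by_cases h : ∀ p ∈ first :: rest, (pnames p).length = 1
  · rw [if_pos h]
    rw [show PySem.Set.update (PySem.Set.empty : PySem.Set String)
        ((first :: rest).map (fun p => (pnames p).headI)) =
        PySem.Set.ofList ((first :: rest).map (fun p => (pnames p).headI)) by
      rw [PySem.Set.ofList_eq_foldl]; rfl]
    rw [decide_eq_true_iff, List.map_cons, ofList_len_one]
    constructor
    · intro hall p hp
      rcases names_len_one p (h p hp) with ⟨x, _, hpx⟩
      rcases List.mem_cons.mp hp with h1 | hp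
      · rw [← h1, hpx]; rfl
      · have hx : (pnames p).headI = (pnames first).headI :=
          hall _ (List.mem_map_of_mem hp)
        rw [hpx] at hx ⊢
        simp at hx
        rw [hx]
    · intro hall y hy
      rcases List.mem_map.mp hy with ⟨q, hq, rfl⟩
      rw [hall q (List.mem_cons_of_mem _ hq)]; rfl
  · rw [if_neg h]
    simp only [Bool.false_eq_true, false_iff]
    intro hall
    exact h (fun p hp => by rw [hall p hp]; rfl)

lemma A_iff (first : List (String × List String)) (rest : List (List (String × List String))) :
    all_products_have_same_single_ingredient (first :: rest) = true ↔
      ∀ p ∈ first :: rest, pnames p = [(pnames first).headI] := by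
  rw [all_products_have_same_single_ingredient, if_neg (by simp)]
  by_cases h : ∀ p ∈ first :: rest, (pnames p).length = 1
  · rw [if_pos ((aCheckSingle_iff _).mpr h)]
    rcases names_len_one first (h first (List.mem_cons_self ..)) with ⟨x, hget, hpx⟩
    have hhead : (pnames first).headI = x := by rw [hpx]; rfl
    simp only [show PySem.List.pyGet? (first :: rest) 0 = some first by
        simp [PySem.List.pyGet?, PySem.List.pyIdx?],
      hget, pyGet?_len_one (rfl : ([x] : List String) = [x])]
    rw [List.all_eq_true]
    constructor
    · intro hall p hp
      rcases names_len_one p (h p hp) with ⟨xp, hgp, hpp⟩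
      have := hall p hp
      simp only [hgp, pyGet?_len_one (rfl : ([xp] : List String) = [xp])] at this
      simp at this
      rw [hpp, this, hhead]
    · intro hall p hp
      rcases names_len_one p (h p hp) with ⟨xp, hgp, hpp⟩
      simp only [hgp, pyGet?_len_one (rfl : ([xp] : List String) = [xp])]
      have := hall p hp
      rw [hpp, hhead] at this
      simp at this
      simp [this]
  · rw [if_neg (fun hc => h ((aCheckSingle_iff _).mp hc))]
    simp only [Bool.false_eq_true, false_iff]
    intro hall
    exact h (fun p hp => by rw [hall p hp]; rfl)

-- ===== VERDICT (by name: the statement is the Claim_ definition above) =====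
theorem all_products_have_same_single_ingredient_spec : Claim_equal_all_products_have_same_single_ingredient := by
  intro products _
  rw [Spec_all_products_have_same_single_ingredient]
  cases products with
  | nil => rfl
  | cons first rest => rw [Bool.eq_iff_iff, A_iff, B_iff]
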